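-- pv_equiv track=rewrite | github.com/SEO7715/Algorithms | week06/프로그래머스_new_id.py | solution
-- ===== SOURCE A (Python) =====
-- def solution(new_id):
--     answer = ''
--     # 대문자를 소문자로 변환
--     new_id = new_id.lower()
--     #  소문자, 숫자, 빼기, 밑줄, 마침표 제외 제거
--     for char in new_id:
--         if char.islower() or char.isdigit() or char == '-' or char == '_' or char == '.':
--             #  .이 연속된 경우 --> . 추가 안함
--             if answer and char == '.' and answer[-1] == '.':
--                 continue
--             answer = answer + char
--     # answer의 처음 또는 끝이 .인경우, '.' 제거
--     answer = answer.strip('.')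
--     # answer가 빈문자열인 경우, 'a'로 넣어주기
--     if not answer:
--         answer = 'a'
--     # answer 길이가 16자 이상일 경우, 15자까지 자르기
--     if len(answer) >= 16:
--         answer = answer[:15]
--     # 15자로 자른 후, 처음과 끝에 '.' 제거
--         answer = answer.strip('.')
--         # answer길이가 2이하면, 길이가 3이될 때까지 answer의 마지막 문자 반복해서 붙여주기
--     while len(answer) < 3:
--         answer = answer + answer[-1]
--     return answer
-- ===== SOURCE B (Python) =====
-- def solution(new_id):
--     s = new_id.lower()
--     s = ''.join(c for c in s if c.islower() or c.isdigit() or c in '-_.')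
--     # collapse runs of '.' and drop leading/trailing dots in one idiomatic step
--     s = '.'.join(p for p in s.split('.') if p)
--     if not s:
--         s = 'a'
--     if len(s) >= 16:
--         s = s[:15].strip('.')
--     while len(s) < 3:
--         s = s + s[-1]
--     return s
-- ===== Notes on version B (the rewrite author's own statement) =====
-- stated objective: idiomatic
-- what changed: A's single fused loop (character filter with an inline skip-a-dot-after-a-dot test) is replaced by separate idiomatic passes: filter the allowed characters, then split on the dot character, drop the empty pieces and re-join with a dot, which collapses dot runs and strips edge dots in one step.
import Mathlib
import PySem

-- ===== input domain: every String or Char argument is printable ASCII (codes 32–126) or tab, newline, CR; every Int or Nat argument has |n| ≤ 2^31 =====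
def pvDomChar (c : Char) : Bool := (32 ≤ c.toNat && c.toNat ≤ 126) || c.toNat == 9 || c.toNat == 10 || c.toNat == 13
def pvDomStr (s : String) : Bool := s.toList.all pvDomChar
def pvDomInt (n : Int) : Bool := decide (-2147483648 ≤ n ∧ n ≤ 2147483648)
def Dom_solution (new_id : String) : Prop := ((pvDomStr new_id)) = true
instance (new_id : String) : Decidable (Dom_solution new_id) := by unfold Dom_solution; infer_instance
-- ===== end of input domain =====

-- B re-decomposes A's single fused filter/dedup loop into idiomatic passes (filter, then
-- split-on-dot / drop-empties / join, which collapses dot runs and strips edge dots at once);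
-- same return value on every input.

-- shared helper: the identical trailing `while len < 3: s += s[-1]` loop of both Pythons
def padShort (s : List Char) : List Char :=
  if _h : s.length < 3 then
    match PySem.List.pyGet? s (-1) with
    | some c => padShort (s ++ [c])
    | none => s
  else s
termination_by 3 - s.length
decreasing_by simp; omega

-- ===== PORT A =====
def solution (new_id : String) : String :=
  let s := PySem.Chars.lower new_id.toList
  let answer := s.foldl (fun ans c =>
    if PySem.Chars.islower c || PySem.Chars.isdigit c || c == '-' || c == '_' || c == '.' then
      if (!ans.isEmpty) && (c == '.') && (PySem.List.pyGet? ans (-1) == some '.') then ans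
      else ans ++ [c]
    else ans) []
  let answer := PySem.Chars.stripChars answer ['.']
  let answer := if answer.isEmpty then ['a'] else answer
  let answer := if 16 ≤ answer.length then
      PySem.Chars.stripChars (PySem.List.slice answer none (some 15)) ['.']
    else answer
  String.mk (padShort answer)

-- ===== PORT B =====
def solution_alt (new_id : String) : String :=
  let s := PySem.Chars.lower new_id.toList
  let s := s.filter (fun c => PySem.Chars.islower c || PySem.Chars.isdigit c ||
      PySem.Chars.isIn [c] ['-', '_', '.'])
  let s := PySem.Chars.join ['.'] ((PySem.Chars.splitOn s ['.']).filter (fun q => !q.isEmpty))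
  let s := if s.isEmpty then ['a'] else s
  let s := if 16 ≤ s.length then
      PySem.Chars.stripChars (PySem.List.slice s none (some 15)) ['.']
    else s
  String.mk (padShort s)

-- ===== PRECONDITION & SPEC =====
def Spec_solution (new_id : String) (out : String) : Prop := out = solution_alt new_id
instance (new_id : String) (out : String) : Decidable (Spec_solution new_id out) := by unfold Spec_solution; infer_instance

-- ===== CLAIM (what is proved, stated in full; the proofs are below) =====
def Claim_equal_solution : Prop := ∀ (new_id : String), Dom_solution new_id → Spec_solution new_id (solution new_id)

-- ===== LEMMAS AND PROOFS =====

-- one-pass dot-collapse with a "previous kept char was a dot" flag: the essence of A's fold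
def collapseB : Bool → List Char → List Char
  | _, [] => []
  | b, c :: r => if c = '.' then (if b then collapseB true r else '.' :: collapseB true r)
                 else c :: collapseB false r

-- split on '.' (single-char separator), structural
def splitDot : List Char → List (List Char)
  | [] => [[]]
  | c :: r => if c = '.' then [] :: splitDot r else
      match splitDot r with
      | [] => [[c]]
      | p :: ps => (c :: p) :: ps

-- "is a dot" predicate, right strip, and B's join-of-nonempty-pieces, as abbreviations
def pdot (c : Char) : Bool := c == '.'
def rstripD (s : List Char) : List Char := (List.dropWhile pdot s.reverse).reverse
def gD (ds : List Char) : List Char :=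
  List.intercalate ['.'] ((splitDot ds).filter (fun q => !q.isEmpty))

theorem pyGet_neg_one_eq_getLast? (l : List Char) : PySem.List.pyGet? l (-1) = l.getLast? := by
  cases l with
  | nil => rfl
  | cons a t => simp [PySem.List.pyGet?, PySem.List.pyIdx?, List.getLast?_eq_getElem?]

theorem splitDot_ne_nil (l : List Char) : splitDot l ≠ [] := by
  cases l with
  | nil => simp [splitDot]
  | cons c r =>
    simp only [splitDot]
    split
    · simp
    · split <;> simp

theorem collapseB_false_dot (r : List Char) : collapseB false ('.' :: r) = '.' :: collapseB true r := by
  simp [collapseB]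

theorem collapseB_cons_nondot (b : Bool) (c : Char) (hc : c ≠ '.') (r : List Char) :
    collapseB b (c :: r) = c :: collapseB false r := by
  simp [collapseB, hc]

theorem foldA_eq_collapseB (cs : List Char) : ∀ acc : List Char,
    cs.foldl (fun ans c =>
      if PySem.Chars.islower c || PySem.Chars.isdigit c || c == '-' || c == '_' || c == '.' then
        if (!ans.isEmpty) && (c == '.') && (PySem.List.pyGet? ans (-1) == some '.') then ans
        else ans ++ [c]
      else ans) acc
    = acc ++ collapseB (acc.getLast? == some '.')
        (cs.filter (fun c => PySem.Chars.islower c || PySem.Chars.isdigit c || c == '-' || c == '_' || c == '.')) := by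
  induction cs with
  | nil => intro acc; simp [collapseB]
  | cons c r ih =>
    intro acc
    rw [List.foldl_cons]
    by_cases hP : (PySem.Chars.islower c || PySem.Chars.isdigit c || c == '-' || c == '_' || c == '.') = true
    · rw [if_pos hP]
      simp only [List.filter_cons, hP, if_pos]
      have hin : ((!acc.isEmpty) && (c == '.') && (PySem.List.pyGet? acc (-1) == some '.'))
          = ((c == '.') && (acc.getLast? == some '.')) := by
        rw [pyGet_neg_one_eq_getLast?]
        cases acc <;> simp
      rw [hin]
      by_cases hc : c = '.'
      · subst hc
        by_cases hl : acc.getLast? = some '.'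
        · rw [if_pos (by simp [hl]), ih acc]
          simp [hl, collapseB]
        · rw [if_neg (by simp [hl]), ih (acc ++ ['.'])]
          have : (acc ++ ['.']).getLast? = some '.' := by simp
          simp [this, collapseB, hl, List.append_assoc]
      · rw [if_neg (by simp [hc]), ih (acc ++ [c])]
        have : (acc ++ [c]).getLast? = some c := by simp
        rw [collapseB_cons_nondot _ c hc, this]
        simp only [List.append_assoc, List.singleton_append]
        rw [show ((some c == some '.') : Bool) = (c == '.') from rfl,
          show (c == '.') = false from beq_eq_false_iff_ne.mpr hc]
    · rw [if_neg hP]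
      rw [Bool.not_eq_true] at hP
      simp only [List.filter_cons, hP, Bool.false_eq_true, if_false]
      exact ih acc

theorem collapseB_true_dropWhile (l : List Char) :
    collapseB true l = collapseB false (l.dropWhile pdot) := by
  induction l with
  | nil => rfl
  | cons c r ih =>
    by_cases hc : c = '.'
    · subst hc
      rw [List.dropWhile_cons_of_pos (by simp [pdot])]
      simpa [collapseB] using ih
    · rw [List.dropWhile_cons_of_neg (by simp [pdot, hc])]
      simp [collapseB, hc]

theorem go_eq_splitDot : ∀ (fuel : Nat) (l cur : List Char) (acc : List (List Char)),
    l.length < fuel →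
    PySem.Chars.splitOn.go ['.'] fuel l cur acc =
      acc.reverse ++ (match splitDot l with
        | [] => [cur.reverse]
        | p :: ps => (cur.reverse ++ p) :: ps) := by
  intro fuel
  induction fuel with
  | zero => intro l cur acc h; omega
  | succ n ih =>
    intro l cur acc h
    cases l with
    | nil =>
      rw [PySem.Chars.splitOn.go]
      simp [splitDot]
      omega
    | cons c rest =>
      rw [PySem.Chars.splitOn.go]
      by_cases hc : c = '.'
      · rw [if_pos (by simp [List.isPrefixOf, hc])]
        rw [show List.drop ['.'].length (c :: rest) = rest by simp]
        rw [ih rest [] (cur.reverse :: acc) (by simpa using Nat.lt_of_succ_lt_succ h)]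
        rcases hs : splitDot rest with _ | ⟨p, ps⟩
        · exact absurd hs (splitDot_ne_nil rest)
        · simp [splitDot, hc, hs]
      · have hpre : ¬ (List.isPrefixOf ['.'] (c :: rest) = true) := by
          simp only [List.isPrefixOf, Bool.and_eq_true, beq_iff_eq]
          intro hcontr
          exact hc hcontr.1.symm
        rw [if_neg hpre]
        rw [ih rest (c :: cur) acc (by simpa using Nat.lt_of_succ_lt_succ h)]
        rcases hs : splitDot rest with _ | ⟨p, ps⟩
        · exact absurd hs (splitDot_ne_nil rest)
        · simp [splitDot, hc, hs]

theorem splitOn_eq_splitDot (l : List Char) : PySem.Chars.splitOn l ['.'] = splitDot l := by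
  have h := go_eq_splitDot (l.length + 1) l [] [] (by omega)
  rcases hs : splitDot l with _ | ⟨p, ps⟩
  · exact absurd hs (splitDot_ne_nil l)
  · simpa [PySem.Chars.splitOn, hs] using h

theorem ic_cons (c : Char) (p : List Char) (Q : List (List Char)) :
    List.intercalate ['.'] ((c :: p) :: Q) = c :: List.intercalate ['.'] (p :: Q) := by
  cases Q <;> simp [List.intercalate, List.intersperse]

theorem ic_cons_cons (p q : List Char) (qs : List (List Char)) :
    List.intercalate ['.'] (p :: q :: qs) = p ++ '.' :: List.intercalate ['.'] (q :: qs) := by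
  simp [List.intercalate, List.intersperse]

theorem gD_cons_dot (r : List Char) : gD ('.' :: r) = gD r := by
  simp [gD, splitDot]

theorem gD_dropWhile (l : List Char) : gD (l.dropWhile pdot) = gD l := by
  induction l with
  | nil => rfl
  | cons c r ih =>
    by_cases hc : c = '.'
    · subst hc
      rw [List.dropWhile_cons_of_pos (by simp [pdot]), ih, gD_cons_dot]
    · rw [List.dropWhile_cons_of_neg (by simp [pdot, hc])]

theorem gD_eq_nil_iff (l : List Char) :
    gD l = [] ↔ (splitDot l).filter (fun q => !q.isEmpty) = [] := by
  unfold gD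
  constructor
  · intro h
    rcases hf : (splitDot l).filter (fun q => !q.isEmpty) with _ | ⟨p, ps⟩
    · exact hf
    · exfalso
      have hp : p ≠ [] := by
        have := List.of_mem_filter (a := p) (l := splitDot l) (p := fun q => !q.isEmpty)
          (by rw [hf]; simp)
        simpa using this
      rw [hf] at h
      cases ps with
      | nil => simp [List.intercalate] at h; exact hp h
      | cons q qs =>
        rw [ic_cons_cons] at h
        rcases p with _ | _ <;> simp_all
  · intro h; rw [h]; rfl

theorem rstripD_cons_nondot (c : Char) (hc : c ≠ '.') (X : List Char) :
    rstripD (c :: X) = c :: rstripD X := by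
  unfold rstripD
  rw [List.reverse_cons, List.dropWhile_append]
  split
  · rename_i h
    rw [List.isEmpty_iff] at h
    rw [h, List.dropWhile_cons_of_neg (by simp [pdot, hc])]
    simp
  · simp

theorem rstripD_cons_dot (X : List Char) :
    rstripD ('.' :: X) = if rstripD X = [] then [] else '.' :: rstripD X := by
  unfold rstripD
  rw [List.reverse_cons, List.dropWhile_append]
  split
  · rename_i h
    rw [List.isEmpty_iff] at h
    rw [h]
    simp [List.dropWhile_cons_of_pos (show pdot '.' = true by simp [pdot])]
  · rename_i h
    have h' : List.dropWhile pdot X.reverse ≠ [] := by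
      intro hh
      simp [hh] at h
    rw [if_neg (fun hh => h' (by simpa using hh))]
    simp

-- a collapse of a dot-free-headed list has a dot-free head
theorem dropWhile_collapseB_dropWhile (l : List Char) :
    List.dropWhile pdot (collapseB false (l.dropWhile pdot)) = collapseB false (l.dropWhile pdot) := by
  induction l with
  | nil => rfl
  | cons c r ih =>
    by_cases hc : c = '.'
    · subst hc; rw [List.dropWhile_cons_of_pos (by simp [pdot])]; exact ih
    · rw [List.dropWhile_cons_of_neg (by simp [pdot, hc])]
      rw [collapseB_cons_nondot _ c hc]
      rw [List.dropWhile_cons_of_neg (by simp [pdot, hc])]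

-- lstrip commutes: stripping leading dots before or after collapsing is the same
theorem dropWhile_collapseB (ds : List Char) :
    List.dropWhile pdot (collapseB false ds) = collapseB false (ds.dropWhile pdot) := by
  cases ds with
  | nil => rfl
  | cons c r =>
    by_cases hc : c = '.'
    · subst hc
      rw [List.dropWhile_cons_of_pos (by simp [pdot]), collapseB_false_dot,
        List.dropWhile_cons_of_pos (by simp [pdot]), collapseB_true_dropWhile]
      exact dropWhile_collapseB_dropWhile r
    · rw [List.dropWhile_cons_of_neg (by simp [pdot, hc]), collapseB_cons_nondot _ c hc,
        List.dropWhile_cons_of_neg (by simp [pdot, hc])]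

theorem head?_dropWhile_pdot (l : List Char) : (l.dropWhile pdot).head? ≠ some '.' := by
  induction l with
  | nil => simp
  | cons c r ih =>
    by_cases hc : c = '.'
    · subst hc; rw [List.dropWhile_cons_of_pos (by simp [pdot])]; exact ih
    · rw [List.dropWhile_cons_of_neg (by simp [pdot, hc])]; simpa using hc

-- gD of a dot-free-headed cons
theorem splitDot_cons_dot (r : List Char) : splitDot ('.' :: r) = [] :: splitDot r := by
  simp [splitDot]

theorem ic_ne_nil (q : List Char) (qs : List (List Char)) :
    List.intercalate ['.'] (q :: qs) ≠ [] ∨ q = [] := by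
  cases qs with
  | nil =>
    rcases q with _ | _
    · right; rfl
    · left; simp [List.intercalate]
  | cons a as =>
    left
    rw [ic_cons_cons]
    simp

theorem gD_cons_nondot (c : Char) (hc : c ≠ '.') (r : List Char) :
    gD (c :: r) = c :: (if r.head? = some '.' ∧ gD r ≠ [] then '.' :: gD r else gD r) := by
  cases r with
  | nil => simp [gD, splitDot, hc, List.intercalate]
  | cons d r' =>
    by_cases hd : d = '.'
    · subst hd
      have hsd : splitDot (c :: '.' :: r') = [c] :: splitDot r' := by
        conv_lhs => rw [splitDot]
        rw [if_neg hc, splitDot_cons_dot]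
      have hLHS : gD (c :: '.' :: r') =
          List.intercalate ['.'] ([c] :: (splitDot r').filter (fun q => !q.isEmpty)) := by
        simp [gD, hsd]
      by_cases hg : gD r' = []
      · have hf : (splitDot r').filter (fun q => !q.isEmpty) = [] := (gD_eq_nil_iff r').1 hg
        rw [hLHS, hf, gD_cons_dot, if_neg (by intro h; exact h.2 hg)]
        rw [hg]
        simp [List.intercalate]
      · have hne : (splitDot r').filter (fun q => !q.isEmpty) ≠ [] := by
          intro h; exact hg ((gD_eq_nil_iff r').2 h)
        rcases hQ : (splitDot r').filter (fun q => !q.isEmpty) with _ | ⟨q, qs⟩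
        · exact absurd hQ hne
        · have hgr : gD ('.' :: r') = List.intercalate ['.'] (q :: qs) := by
            rw [gD_cons_dot]; simp [gD, hQ]
          have hq : q ≠ [] := by
            have := List.of_mem_filter (a := q) (l := splitDot r') (p := fun q => !q.isEmpty)
              (by rw [hQ]; simp)
            simpa using this
          have hnn : gD ('.' :: r') ≠ [] := by
            rw [hgr]
            rcases ic_ne_nil q qs with h | h
            · exact h
            · exact absurd h hq
          rw [hLHS, hQ, ic_cons_cons, if_pos ⟨rfl, hnn⟩, hgr]
          simp
    · rcases hs : splitDot r' with _ | ⟨p, ps⟩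
      · exact absurd hs (splitDot_ne_nil r')
      · have h1 : splitDot (d :: r') = (d :: p) :: ps := by
          conv_lhs => rw [splitDot]
          rw [if_neg hd, hs]
        have h2 : splitDot (c :: d :: r') = (c :: d :: p) :: ps := by
          conv_lhs => rw [splitDot]
          rw [if_neg hc, h1]
        simp only [gD, h1, h2, List.filter_cons, List.isEmpty_cons, Bool.not_false, if_pos]
        rw [ic_cons]
        simp [hd]

-- central recursion: right-strip of the collapse, for arbitrary input
theorem rstrip_collapse : (ds : List Char) →
    rstripD (collapseB false ds) =
      if ds.head? = some '.' ∧ gD ds ≠ [] then '.' :: gD ds else gD ds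
  | [] => by simp [collapseB, rstripD, gD, splitDot, List.intercalate]
  | c :: r => by
    by_cases hc : c = '.'
    · subst hc
      rw [collapseB_false_dot, collapseB_true_dropWhile, rstripD_cons_dot,
        rstrip_collapse (r.dropWhile pdot)]
      have hh := head?_dropWhile_pdot r
      have hcond : ¬ ((List.dropWhile pdot r).head? = some '.' ∧ gD (List.dropWhile pdot r) ≠ []) :=
        fun h => hh h.1
      rw [if_neg hcond]
      rw [gD_dropWhile, ← gD_cons_dot r]
      by_cases hg : gD ('.' :: r) = []
      · simp [hg]
      · simp [hg]
    · rw [collapseB_cons_nondot _ c hc, rstripD_cons_nondot c hc, rstrip_collapse r,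
        gD_cons_nondot c hc r]
      simp [hc]
  termination_by ds => ds.length
  decreasing_by
    · simpa using Nat.lt_succ_of_le (List.length_dropWhile_le pdot r)
    · simp

-- the central lemma: collapse-then-strip = join of nonempty split pieces
theorem main_lemma (ds : List Char) :
    PySem.Chars.stripChars (collapseB false ds) ['.'] = gD ds := by
  have hp : (fun c : Char => List.contains ['.'] c) = pdot := by
    funext c
    simp only [List.contains, List.elem_cons, List.elem_nil, pdot]
    cases c == '.' <;> rfl
  have hstrip : PySem.Chars.stripChars (collapseB false ds) ['.']
      = rstripD (List.dropWhile pdot (collapseB false ds)) := by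
    simp only [PySem.Chars.stripChars, rstripD]
    rw [hp]
  rw [hstrip, dropWhile_collapseB, rstrip_collapse (ds.dropWhile pdot)]
  rw [if_neg (by intro h; exact head?_dropWhile_pdot ds h.1)]
  exact gD_dropWhile ds

-- the two character filters agree
theorem pred_eq (c : Char) :
    (PySem.Chars.islower c || PySem.Chars.isdigit c || c == '-' || c == '_' || c == '.') =
    (PySem.Chars.islower c || PySem.Chars.isdigit c || PySem.Chars.isIn [c] ['-', '_', '.']) := by
  have : PySem.Chars.isIn [c] ['-', '_', '.'] = (c == '-' || c == '_' || c == '.') := by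
    by_cases h : c ∈ ['-', '_', '.']
    · rw [(PySem.Chars.isIn_iff_infix _ _).2 ((List.singleton_infix_iff c _).2 h)]
      simp at h
      rcases h with h | h | h <;> simp [h]
    · rw [(PySem.Chars.isIn_eq_false_iff _ _).2 (fun hi => h ((List.singleton_infix_iff c _).1 hi))]
      simp at h
      simp [h.1, h.2.1, h.2.2]
  rw [this]
  simp [Bool.or_assoc]

-- ===== VERDICT (by name: the statement is the Claim_ definition above) =====
theorem solution_spec : Claim_equal_solution := by
  intro new_id _
  unfold Spec_solution solution solution_alt
  simp only
  rw [foldA_eq_collapseB]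
  have hpred : (PySem.Chars.lower new_id.toList).filter
        (fun c => PySem.Chars.islower c || PySem.Chars.isdigit c || PySem.Chars.isIn [c] ['-', '_', '.'])
      = (PySem.Chars.lower new_id.toList).filter
        (fun c => PySem.Chars.islower c || PySem.Chars.isdigit c || c == '-' || c == '_' || c == '.') := by
    apply List.filter_congr
    intro x _
    rw [pred_eq]
  rw [splitOn_eq_splitDot, hpred]
  rw [show ((List.getLast? ([] : List Char)) == some '.') = false from rfl,
    List.nil_append, main_lemma]
  rfl
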